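-- pv_equiv track=rewrite | github.com/AstroAir/code-extractor | src/pysearch/utils.py | highlight_spans
-- ===== SOURCE A (Python) =====
-- def highlight_spans(
--     line: str, spans: list[tuple[int, int]], marker_left: str = "[", marker_right: str = "]"
-- ) -> str:
--     """Lightweight span highlighting for plain text output when rich is unavailable in some contexts."""
--     if not spans:
--         return line
--     # Ensure non-overlapping and sorted
--     spans = sorted(spans, key=lambda x: x[0])
--     out: list[str] = []
--     last = 0
--     for a, b in spans:
--         a = max(0, min(len(line), a))
--         b = max(0, min(len(line), b))
--         if a < last:
--             a = last
--         if b < a: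
--             continue
--         out.append(line[last:a])
--         out.append(marker_left)
--         out.append(line[a:b])
--         out.append(marker_right)
--         last = b
--     out.append(line[last:])
--     return "".join(out)
-- ===== SOURCE B (Python) =====
-- def highlight_spans(
--     line: str, spans: list[tuple[int, int]], marker_left: str = "[", marker_right: str = "]"
-- ) -> str:
--     """Insertion-array rendering: normalize spans once, queue markers at their
--     character positions, then emit the line in a single position scan."""
--     if not spans:
--         return line
--     n = len(line)
--     # one marker queue per position 0..n; markers are appended in span order
--     ins: list[list[str]] = [[] for _ in range(n + 1)]
--     last = 0
--     for a, b in sorted(spans, key=lambda t: t[0]):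
--         a = min(max(a, 0), n)
--         b = min(max(b, 0), n)
--         if a < last:
--             a = last
--         if b < a:
--             continue
--         ins[a].append(marker_left)
--         ins[b].append(marker_right)
--         last = b
--     parts: list[str] = []
--     for group, ch in zip(ins, line):
--         parts.extend(group)
--         parts.append(ch)
--     parts.extend(ins[-1])
--     return "".join(parts)
-- ===== Notes on version B (the rewrite author's own statement) =====
-- stated objective: alternative
-- what changed: Instead of A's single loop that interleaves normalization with slicing out text segments and appending marker/segment pieces, B normalizes the spans into a position-indexed array of queued markers (one queue per character position) and then renders the whole line in one character scan, emitting each position's queued markers before its character.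
import Mathlib
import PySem

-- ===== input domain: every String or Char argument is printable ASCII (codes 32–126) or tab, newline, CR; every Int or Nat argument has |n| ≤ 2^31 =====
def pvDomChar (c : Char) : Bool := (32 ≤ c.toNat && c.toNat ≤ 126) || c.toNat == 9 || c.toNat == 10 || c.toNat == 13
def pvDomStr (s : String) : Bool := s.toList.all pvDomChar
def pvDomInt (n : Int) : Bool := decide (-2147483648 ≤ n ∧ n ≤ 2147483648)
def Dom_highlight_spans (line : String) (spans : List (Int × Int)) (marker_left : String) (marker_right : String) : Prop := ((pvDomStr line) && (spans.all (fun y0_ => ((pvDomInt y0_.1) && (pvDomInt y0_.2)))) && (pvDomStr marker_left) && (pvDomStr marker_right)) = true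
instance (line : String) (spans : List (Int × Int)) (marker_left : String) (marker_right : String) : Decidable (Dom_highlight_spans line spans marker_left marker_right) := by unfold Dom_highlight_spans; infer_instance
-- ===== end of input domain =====

-- B replaces A's interleaved slice-and-append loop by a position-indexed marker
-- queue rendered in one scan of the line (objective: alternative decomposition).

-- ===== PORT A =====
def pvStepA (line : String) (marker_left marker_right : String)
    (st : List String × Int) (p : Int × Int) : List String × Int :=
  let a0 := max 0 (min (PySem.Str.len line) p.1)
  let b := max 0 (min (PySem.Str.len line) p.2)
  let a := if a0 < st.2 then st.2 else a0
  if b < a then st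
  else (st.1 ++ [PySem.Str.slice line (some st.2) (some a), marker_left,
                 PySem.Str.slice line (some a) (some b), marker_right], b)

def highlight_spans (line : String) (spans : List (Int × Int)) (marker_left : String) (marker_right : String) : String :=
  if spans = [] then line
  else
    let st := (PySem.List.sorted spans (fun x => x.1) false).foldl
      (pvStepA line marker_left marker_right) ([], 0)
    PySem.Str.join "" (st.1 ++ [PySem.Str.slice line (some st.2) none])

-- ===== PORT B =====
-- ins[i].append(s); the List.set/toNat indexing is exact because every call site has 0 ≤ i < ins.length
def pvAppendAt (ins : List (List String)) (i : Int) (s : String) : List (List String) :=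
  ins.set i.toNat (PySem.List.pyGetD ins i [] ++ [s])

def pvStepB (n : Int) (marker_left marker_right : String)
    (st : List (List String) × Int) (p : Int × Int) : List (List String) × Int :=
  let a0 := min (max p.1 0) n
  let b := min (max p.2 0) n
  let a := if a0 < st.2 then st.2 else a0
  if b < a then st
  else (pvAppendAt (pvAppendAt st.1 a marker_left) b marker_right, b)

def highlight_spans_alt (line : String) (spans : List (Int × Int)) (marker_left : String) (marker_right : String) : String :=
  if spans = [] then line
  else
    let n := PySem.Str.len line
    let st := (PySem.List.sorted spans (fun t => t.1) false).foldl
      (pvStepB n marker_left marker_right) (List.replicate (n.toNat + 1) [], 0)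
    let parts := (st.1.zip line.toList).foldl
      (fun acc gp => acc ++ gp.1 ++ [String.ofList [gp.2]]) []
    PySem.Str.join "" (parts ++ PySem.List.pyGetD st.1 (-1) [])

-- ===== PRECONDITION & SPEC =====
def Spec_highlight_spans (line : String) (spans : List (Int × Int)) (marker_left : String) (marker_right : String) (out : String) : Prop := out = highlight_spans_alt line spans marker_left marker_right
instance (line : String) (spans : List (Int × Int)) (marker_left : String) (marker_right : String) (out : String) : Decidable (Spec_highlight_spans line spans marker_left marker_right out) := by unfold Spec_highlight_spans; infer_instance

-- ===== CLAIM (what is proved, stated in full; the proofs are below) =====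
def Claim_equal_highlight_spans : Prop := ∀ (line : String) (spans : List (Int × Int)) (marker_left : String) (marker_right : String), Dom_highlight_spans line spans marker_left marker_right → Spec_highlight_spans line spans marker_left marker_right (highlight_spans line spans marker_left marker_right)

-- ===== LEMMAS AND PROOFS =====

-- character-level semantics: flatten a list of string pieces
def pvFlat (g : List String) : List Char := (g.map String.toList).flatten

-- render a list of marker groups interleaved with the characters of the line
def pvRenderZ : List (List String) → List Char → List Char
  | g :: gs, c :: cs => pvFlat g ++ c :: pvRenderZ gs cs
  | _, _ => []

-- what A's loop emits from state `last` onward (the common normal form)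
def pvAtail (L ML MR : List Char) : List (Int × Int) → Int → List Char
  | [], last => L.drop last.toNat
  | p :: ss, last =>
    let a0 := max 0 (min (L.length : Int) p.1)
    let b := max 0 (min (L.length : Int) p.2)
    let a := if a0 < last then last else a0
    if b < a then pvAtail L ML MR ss last
    else List.take (a.toNat - last.toNat) (L.drop last.toNat) ++ ML
         ++ List.take (b.toNat - a.toNat) (L.drop a.toNat) ++ MR ++ pvAtail L ML MR ss b

-- render of the (already final) part of the insertion array: positions < k with their chars, plus group k
def pvPrefixR (L : List Char) (ins : List (List String)) (k : Nat) : List Char :=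
  pvRenderZ (ins.take k) (L.take k) ++ pvFlat (ins.getD k [])

theorem pvFlat_append (xs ys : List String) : pvFlat (xs ++ ys) = pvFlat xs ++ pvFlat ys := by
  simp [pvFlat]

theorem pvRenderZ_append (gs1 gs2 : List (List String)) (cs1 cs2 : List Char)
    (h : gs1.length = cs1.length) :
    pvRenderZ (gs1 ++ gs2) (cs1 ++ cs2) = pvRenderZ gs1 cs1 ++ pvRenderZ gs2 cs2 := by
  induction gs1 generalizing cs1 with
  | nil => cases cs1 with
    | nil => simp [pvRenderZ]
    | cons c cs => simp at h
  | cons g gs ih =>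
    cases cs1 with
    | nil => simp at h
    | cons c cs => simp at h; simp [pvRenderZ, ih cs h]

theorem pvRenderZ_all_empty (gs : List (List String)) (cs : List Char)
    (h : ∀ g ∈ gs, g = []) (hl : cs.length ≤ gs.length) : pvRenderZ gs cs = cs := by
  induction gs generalizing cs with
  | nil => cases cs with
    | nil => rfl
    | cons c cs => simp at hl
  | cons g gs ih =>
    cases cs with
    | nil => rfl
    | cons c cs =>
      have hg : g = [] := h g (by simp)
      simp at hl
      simp [pvRenderZ, hg, pvFlat, ih cs (fun x hx => h x (by simp [hx])) hl]

theorem pvRenderZ_head (g : List String) (gs : List (List String)) (cs : List Char)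
    (h : ∀ x ∈ gs, x = []) (h1 : 1 ≤ cs.length) (h2 : cs.length ≤ gs.length + 1) :
    pvRenderZ (g :: gs) cs = pvFlat g ++ cs := by
  cases cs with
  | nil => simp at h1
  | cons c cs =>
    simp at h2
    simp [pvRenderZ, pvRenderZ_all_empty gs cs h (by omega)]

theorem pvGetD_eq (ins : List (List String)) (p : Nat) (hp : p < ins.length) :
    ins.getD p [] = ins[p] := by
  simp [List.getD_eq_getElem?_getD, List.getElem?_eq_getElem hp]

-- elements of ins.drop (k+1) are positions > k
theorem pvDrop_all_empty (ins : List (List String)) (k : Nat)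
    (hE : ∀ p : Nat, k < p → ins.getD p [] = []) :
    ∀ x ∈ ins.drop (k + 1), x = [] := by
  intro x hx
  rw [List.mem_iff_getElem] at hx
  obtain ⟨i, hi, hxi⟩ := hx
  have hlen : k + 1 + i < ins.length := by
    have := List.length_drop (l := ins) (i := k + 1); omega
  have := hE (k + 1 + i) (by omega)
  rw [pvGetD_eq ins (k + 1 + i) hlen] at this
  rw [← hxi, List.getElem_drop]
  exact this

theorem pvDropEq (ins : List (List String)) (k : Nat) (hk : k < ins.length) :
    ins.drop k = ins.getD k [] :: ins.drop (k + 1) := by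
  rw [pvGetD_eq ins k hk]
  exact List.drop_eq_getElem_cons hk

-- the single-append step on the prefix render
theorem pvPrefix_step (L : List Char) (ins : List (List String)) (s : String) (k j : Nat)
    (hlen : ins.length = L.length + 1) (hkj : k ≤ j) (hj : j ≤ L.length)
    (hE : ∀ p : Nat, k < p → ins.getD p [] = []) :
    pvPrefixR L (ins.set j (ins.getD j [] ++ [s])) j
      = pvPrefixR L ins k ++ (L.drop k).take (j - k) ++ s.toList := by
  have hjlen : j < ins.length := by omega
  have htake : (ins.set j (ins.getD j [] ++ [s])).take j = ins.take j := by
    rw [List.take_set]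
    exact List.set_eq_of_length_le (List.length_take_le _ _)
  have hgetD : (ins.set j (ins.getD j [] ++ [s])).getD j [] = ins.getD j [] ++ [s] := by
    rw [List.getD_eq_getElem?_getD, List.getElem?_set_self hjlen]
    rfl
  rcases Nat.eq_or_lt_of_le hkj with heq | hlt
  · subst heq
    unfold pvPrefixR
    rw [htake, hgetD, pvFlat_append]
    simp [pvFlat]
  · -- k < j
    have hkL : k < L.length := by omega
    have hj0 : ins.getD j [] = [] := hE j hlt
    have hsplitI : ins.take j = ins.take k ++ (ins.drop k).take (j - k) := by
      calc ins.take j = ins.take (k + (j - k)) := by congr 1; omega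
        _ = ins.take k ++ (ins.drop k).take (j - k) := List.take_add
    have hsplitL : L.take j = L.take k ++ (L.drop k).take (j - k) := by
      calc L.take j = L.take (k + (j - k)) := by congr 1; omega
        _ = L.take k ++ (L.drop k).take (j - k) := List.take_add
    have hseg : pvRenderZ ((ins.drop k).take (j - k)) ((L.drop k).take (j - k))
        = pvFlat (ins.getD k []) ++ (L.drop k).take (j - k) := by
      have hdk : (ins.drop k).take (j - k)
          = ins.getD k [] :: (ins.drop (k + 1)).take (j - k - 1) := by
        rw [pvDropEq ins k (by omega)]
        cases hjk : j - k with
        | zero => omega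
        | succ m => simp [List.take_succ_cons]
      rw [hdk]
      apply pvRenderZ_head
      · intro x hx
        exact pvDrop_all_empty ins k hE x (List.mem_of_mem_take hx)
      · rw [List.length_take_of_le (by rw [List.length_drop]; omega)]
        omega
      · rw [List.length_take_of_le (by rw [List.length_drop]; omega),
            List.length_take_of_le (by rw [List.length_drop, hlen]; omega)]
        omega
    unfold pvPrefixR
    rw [htake, hgetD, hsplitI, hsplitL,
        pvRenderZ_append _ _ _ _ (by rw [List.length_take_of_le (by omega), List.length_take_of_le (by omega)]),
        hseg, hj0, pvFlat_append]
    simp [pvFlat]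

-- two Python clamp spellings agree
theorem pvClamp_eq (n x : Int) (hn : 0 ≤ n) : max 0 (min n x) = min (max x 0) n := by
  omega

theorem pvB_len (n : Int) (ml mr : String) (ss : List (Int × Int)) :
    ∀ (ins : List (List String)) (last : Int),
    (ss.foldl (pvStepB n ml mr) (ins, last)).1.length = ins.length := by
  induction ss with
  | nil => intro ins last; rfl
  | cons p ss ih =>
    intro ins last
    simp only [List.foldl_cons]
    have h1 := ih (pvStepB n ml mr (ins, last) p).1 (pvStepB n ml mr (ins, last) p).2
    rw [Prod.mk.eta] at h1
    rw [h1]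
    dsimp only [pvStepB, pvAppendAt]
    split <;> (try split) <;> simp

-- B's loop invariant: the final array renders as the frozen prefix plus A's tail
theorem pvB_loop (L : List Char) (ml mr : String) (ss : List (Int × Int)) :
    ∀ (ins : List (List String)) (last : Int),
    ins.length = L.length + 1 → 0 ≤ last → last ≤ (L.length : Int) →
    (∀ p : Nat, last.toNat < p → ins.getD p [] = []) →
    pvRenderZ (ss.foldl (pvStepB (L.length : Int) ml mr) (ins, last)).1 L
      ++ pvFlat ((ss.foldl (pvStepB (L.length : Int) ml mr) (ins, last)).1.getD L.length [])
      = pvPrefixR L ins last.toNat ++ pvAtail L ml.toList mr.toList ss last := by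
  induction ss with
  | nil =>
    intro ins last hlen h0 hn hE
    simp only [List.foldl_nil, pvAtail]
    set k := last.toNat with hk
    have hkn : k ≤ L.length := by omega
    have hlenk : (List.take k ins).length = (List.take k L).length := by
      rw [List.length_take_of_le (by omega), List.length_take_of_le (by omega)]
    have hr : pvRenderZ ins L = pvRenderZ (ins.take k) (L.take k) ++ pvRenderZ (ins.drop k) (L.drop k) := by
      conv_lhs => rw [← List.take_append_drop k ins, ← List.take_append_drop k L]
      exact pvRenderZ_append _ _ _ _ hlenk
    rw [hr]
    rcases Nat.eq_or_lt_of_le hkn with heq | hlt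
    · have hLdrop : L.drop k = [] := by rw [heq]; simp
      have hz : pvRenderZ (ins.drop k) (L.drop k) = [] := by
        rw [hLdrop]; cases h2 : ins.drop k <;> rfl
      rw [hz, hLdrop, ← heq]
      simp [pvPrefixR]
    · have hdk : pvRenderZ (ins.drop k) (L.drop k) = pvFlat (ins.getD k []) ++ L.drop k := by
        rw [pvDropEq ins k (by omega)]
        apply pvRenderZ_head
        · exact pvDrop_all_empty ins k hE
        · rw [List.length_drop]; omega
        · rw [List.length_drop, List.length_drop, hlen]; omega
      have hgd : ins.getD L.length [] = [] := hE L.length (by omega)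
      rw [hdk, hgd]
      simp [pvPrefixR, pvFlat, List.append_assoc]
  | cons p ss ih =>
    intro ins last hlen h0 hn hE
    simp only [List.foldl_cons]
    simp only [pvAtail]
    rw [show max 0 (min ((L.length : Int)) p.1) = min (max p.1 0) (L.length : Int) from pvClamp_eq _ _ (by omega),
        show max 0 (min ((L.length : Int)) p.2) = min (max p.2 0) (L.length : Int) from pvClamp_eq _ _ (by omega)]
    have hstep : pvStepB (L.length : Int) ml mr (ins, last) p
        = (if min (max p.2 0) (L.length : Int) < (if min (max p.1 0) (L.length : Int) < last then last else min (max p.1 0) (L.length : Int)) then (ins, last)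
           else (pvAppendAt (pvAppendAt ins (if min (max p.1 0) (L.length : Int) < last then last else min (max p.1 0) (L.length : Int)) ml) (min (max p.2 0) (L.length : Int)) mr,
                 min (max p.2 0) (L.length : Int))) := rfl
    rw [hstep]
    set a0 := min (max p.1 0) (L.length : Int) with ha0
    set b := min (max p.2 0) (L.length : Int) with hb
    set a := if a0 < last then last else a0 with ha
    have h0a : 0 ≤ a := by rw [ha]; split <;> omega
    have h0b : 0 ≤ b := by omega
    have hbn : b ≤ (L.length : Int) := by omega
    have hla : last ≤ a := by rw [ha]; split <;> omega
    have han : a ≤ (L.length : Int) := by rw [ha]; split <;> omega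
    by_cases hba : b < a
    · simp only [if_pos hba]
      exact ih ins last hlen h0 hn hE
    · simp only [if_neg hba]
      have hab : a ≤ b := by omega
      -- the two appends
      set ins1 := pvAppendAt ins a ml with hins1
      set ins2 := pvAppendAt ins1 b mr with hins2
      have hins1' : ins1 = ins.set a.toNat (ins.getD a.toNat [] ++ [ml]) := by
        rw [hins1]; unfold pvAppendAt
        rw [PySem.List.pyGetD_of_nonneg ins [] h0a]
      have hlen1 : ins1.length = L.length + 1 := by rw [hins1']; simp [hlen]
      have hins2' : ins2 = ins1.set b.toNat (ins1.getD b.toNat [] ++ [mr]) := by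
        rw [hins2]; unfold pvAppendAt
        rw [PySem.List.pyGetD_of_nonneg ins1 [] h0b]
      have hE1 : ∀ q : Nat, a.toNat < q → ins1.getD q [] = [] := by
        intro q hq
        rw [hins1']
        rw [List.getD_eq_getElem?_getD, List.getElem?_set_ne (by omega), ← List.getD_eq_getElem?_getD]
        exact hE q (by omega)
      have hE2 : ∀ q : Nat, b.toNat < q → ins2.getD q [] = [] := by
        intro q hq
        rw [hins2']
        rw [List.getD_eq_getElem?_getD, List.getElem?_set_ne (by omega), ← List.getD_eq_getElem?_getD]
        exact hE1 q (by omega)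
      have hlen2 : ins2.length = L.length + 1 := by rw [hins2']; simp [hlen1]
      have step1 := pvPrefix_step L ins ml last.toNat a.toNat hlen (by omega) (by omega) hE
      have step2 := pvPrefix_step L ins1 mr a.toNat b.toNat hlen1 (by omega) (by omega) hE1
      rw [← hins1'] at step1
      rw [← hins2'] at step2
      have := ih ins2 b hlen2 h0b hbn hE2
      rw [this, step2, step1]
      simp [List.append_assoc]

-- A's loop produces exactly pvAtail
theorem pvA_loop (line ml mr : String) (ss : List (Int × Int)) :
    ∀ (out : List String) (last : Int), 0 ≤ last → last ≤ (line.toList.length : Int) →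
    pvFlat ((ss.foldl (pvStepA line ml mr) (out, last)).1
        ++ [PySem.Str.slice line (some (ss.foldl (pvStepA line ml mr) (out, last)).2) none])
      = pvFlat out ++ pvAtail line.toList ml.toList mr.toList ss last := by
  induction ss with
  | nil =>
    intro out last h0 hn
    simp only [List.foldl_nil, pvAtail, pvFlat_append]
    congr 1
    simp [pvFlat, PySem.Str.toList_slice, PySem.Chars.slice_eq_listSlice,
      PySem.List.slice_from line.toList h0]
  | cons p ss ih =>
    intro out last h0 hn
    simp only [List.foldl_cons]
    have hstep : pvStepA line ml mr (out, last) p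
        = (if max 0 (min (PySem.Str.len line) p.2) < (if max 0 (min (PySem.Str.len line) p.1) < last then last else max 0 (min (PySem.Str.len line) p.1)) then (out, last)
           else (out ++ [PySem.Str.slice line (some last) (some (if max 0 (min (PySem.Str.len line) p.1) < last then last else max 0 (min (PySem.Str.len line) p.1))), ml,
                          PySem.Str.slice line (some (if max 0 (min (PySem.Str.len line) p.1) < last then last else max 0 (min (PySem.Str.len line) p.1))) (some (max 0 (min (PySem.Str.len line) p.2))), mr],
                 max 0 (min (PySem.Str.len line) p.2))) := rfl
    rw [hstep]
    simp only [PySem.Str.len_eq]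
    simp only [pvAtail]
    set a0 := max 0 (min ((line.toList.length : Int)) p.1) with ha0
    set b := max 0 (min ((line.toList.length : Int)) p.2) with hb
    set a := if a0 < last then last else a0 with ha
    have h0a : 0 ≤ a := by rw [ha]; split <;> omega
    have h0b : 0 ≤ b := by omega
    have hbn : b ≤ (line.toList.length : Int) := by omega
    by_cases hba : b < a
    · simp only [if_pos hba]
      exact ih out last h0 hn
    by_cases hba : b < a
    · simp only [if_pos hba]
      exact ih out last h0 hn
    · simp only [if_neg hba]
      rw [ih _ b h0b hbn]
      rw [pvFlat_append]
      simp [pvFlat, PySem.Str.toList_slice, PySem.Chars.slice_eq_listSlice,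
        PySem.List.slice_toNat line.toList h0 h0a,
        PySem.List.slice_toNat line.toList h0a h0b, List.append_assoc]

-- "".join over List Char
theorem pvIntersperse_nil (xss : List (List Char)) :
    (List.intersperse [] xss).flatten = xss.flatten := by
  induction xss with
  | nil => rfl
  | cons x xss ih =>
    cases xss with
    | nil => rfl
    | cons y yss =>
      have h2 : List.intersperse ([] : List Char) (x :: y :: yss)
          = x :: [] :: List.intersperse [] (y :: yss) := rfl
      simp only [h2, List.flatten_cons]
      simp [ih]

theorem pvJoin_toList (parts : List String) :
    (PySem.Str.join "" parts).toList = pvFlat parts := by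
  rw [PySem.Str.toList_join]
  show PySem.Chars.join "".toList (parts.map String.toList) = pvFlat parts
  have : "".toList = ([] : List Char) := rfl
  rw [this]
  unfold PySem.Chars.join
  rw [List.intercalate]
  exact pvIntersperse_nil _

-- B's character scan renders the array
theorem pvParts_render (gs : List (List String)) (cs : List Char) :
    ∀ acc : List String,
    pvFlat ((gs.zip cs).foldl (fun acc gp => acc ++ gp.1 ++ [String.ofList [gp.2]]) acc)
      = pvFlat acc ++ pvRenderZ gs cs := by
  induction gs generalizing cs with
  | nil => intro acc; simp [pvRenderZ]
  | cons g gs ih =>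
    intro acc
    cases cs with
    | nil => simp [pvRenderZ]
    | cons c cs =>
      simp only [List.zip_cons_cons, List.foldl_cons]
      rw [ih cs]
      simp [pvRenderZ, pvFlat, List.append_assoc]

theorem pvReplicate_getD (m p : Nat) : (List.replicate m ([] : List String)).getD p [] = [] := by
  simp only [List.getD_eq_getElem?_getD, List.getElem?_replicate]
  split <;> rfl

theorem pvPyGetD_neg_one (xs : List (List String)) (h : xs ≠ []) :
    PySem.List.pyGetD xs (-1) [] = xs.getD (xs.length - 1) [] := by
  have hn : 0 < xs.length := List.length_pos_of_ne_nil h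
  have h1 : PySem.List.pyIdx? xs.length (-1) = some (xs.length - 1) := by
    simp [PySem.List.pyIdx?, show -(xs.length:Int) ≤ -1 by omega]
  simp [PySem.List.pyGetD, PySem.List.pyGet?, h1, List.getD_eq_getElem?_getD]

-- main equivalence on toList
theorem pv_main (line : String) (spans : List (Int × Int)) (ml mr : String) :
    highlight_spans line spans ml mr = highlight_spans_alt line spans ml mr := by
  by_cases hsp : spans = []
  · simp [highlight_spans, highlight_spans_alt, hsp]
  · apply String.toList_inj.mp
    unfold highlight_spans highlight_spans_alt
    simp only [if_neg hsp, PySem.Str.len_eq, Int.toNat_natCast]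
    set L := line.toList with hL
    set ss := PySem.List.sorted spans (fun x => x.1) false with hss
    -- A side
    rw [pvJoin_toList, pvJoin_toList]
    have hA := pvA_loop line ml mr ss [] 0 (by omega) (by omega)
    rw [hA]
    -- B side
    set ins0 : List (List String) := List.replicate (L.length + 1) [] with hins0
    have hlen0 : ins0.length = L.length + 1 := by simp [hins0]
    have hE0 : ∀ p : Nat, (0 : Int).toNat < p → ins0.getD p [] = [] := by
      intro p _; exact pvReplicate_getD _ _
    have hB := pvB_loop L ml mr ss ins0 0 hlen0 (by omega) (by omega) hE0
    set stB := ss.foldl (pvStepB (L.length : Int) ml mr) (ins0, 0) with hstB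
    have hlenB : stB.1.length = L.length + 1 := by
      rw [hstB, pvB_len, hlen0]
    rw [pvFlat_append, pvParts_render stB.1 L []]
    rw [pvPyGetD_neg_one stB.1 (by intro hnil; rw [hnil] at hlenB; simp at hlenB),
        hlenB]
    simp only [Nat.add_sub_cancel]
    rw [show pvFlat ([] : List String) ++ pvRenderZ stB.1 L ++ pvFlat (stB.1.getD L.length []) = pvRenderZ stB.1 L ++ pvFlat (stB.1.getD L.length []) from by simp [pvFlat]]
    rw [hB]
    have hpre0 : pvPrefixR L ins0 (0 : Int).toNat = [] := by
      simp [pvPrefixR, pvRenderZ, hins0, pvFlat]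
    rw [hpre0]
    simp only [List.nil_append]
    rw [show pvFlat ([] : List String) = [] from rfl]
    simp only [List.nil_append]
    rfl

-- ===== VERDICT (by name: the statement is the Claim_ definition above) =====
theorem highlight_spans_spec : Claim_equal_highlight_spans := by
  intro line spans ml mr _
  unfold Spec_highlight_spans
  exact pv_main line spans ml mr
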